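-- pv_equiv track=rewrite | github.com/bseverns/classhub | services/classhub/hub/views/teacher_parts/shared_routing.py | _split_helper_topics_text
-- ===== SOURCE A (Python) =====
-- def _split_helper_topics_text(raw: str) -> list[str]:
--     parts: list[str] = []
--     normalized = (raw or "").replace("\r\n", "\n").replace("\r", "\n")
--     for line in normalized.split("\n"):
--         for segment in line.split("|"):
--             token = segment.strip()
--             if token:
--                 parts.append(token)
--     return parts
-- ===== SOURCE B (Python) =====
-- def _split_helper_topics_text(raw: str) -> list[str]:
--     parts: list[str] = []
--     buf: list[str] = []
--     for ch in (raw or ""):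
--         if ch in "\r\n|":
--             token = "".join(buf).strip()
--             if token:
--                 parts.append(token)
--             buf = []
--         else:
--             buf.append(ch)
--     token = "".join(buf).strip()
--     if token:
--         parts.append(token)
--     return parts
-- ===== Notes on version B (the rewrite author's own statement) =====
-- stated objective: simpler
-- what changed: One pass over the characters with a token buffer flushed at each of , , |, instead of two replace-based normalizations followed by two nested split loops.
import Mathlib
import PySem

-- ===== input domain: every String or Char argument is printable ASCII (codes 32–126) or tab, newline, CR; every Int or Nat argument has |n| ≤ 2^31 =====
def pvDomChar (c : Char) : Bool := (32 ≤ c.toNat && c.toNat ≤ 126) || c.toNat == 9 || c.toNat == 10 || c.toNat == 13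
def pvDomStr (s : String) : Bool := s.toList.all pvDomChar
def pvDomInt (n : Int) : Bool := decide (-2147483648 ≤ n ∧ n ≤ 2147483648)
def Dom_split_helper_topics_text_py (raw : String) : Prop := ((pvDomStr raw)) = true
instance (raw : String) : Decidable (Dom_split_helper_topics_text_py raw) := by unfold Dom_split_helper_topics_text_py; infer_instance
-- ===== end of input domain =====

-- B replaces A's two replace-based normalizations and nested split loops by a single
-- character scan with a token buffer flushed at each delimiter (simpler, one pass).

-- ===== PORT A =====
-- literal port of A: normalize "\r\n"/"\r" to "\n", split on "\n", split each line on "|",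
-- strip each segment and append the non-empty tokens.  splits are taken on .toList via
-- PySem.Chars.splitOn (exact); `raw or ""` is ported as the if-expression below.
def split_helper_topics_text_py (raw : String) : List String :=
  let raw0 : String := if raw == "" then "" else raw
  let normalized : String :=
    PySem.Str.replace (PySem.Str.replace raw0 "\r\n" "\n") "\r" "\n"
  (PySem.Chars.splitOn normalized.toList ['\n']).foldl (fun parts line =>
    (PySem.Chars.splitOn line ['|']).foldl (fun parts segment =>
      let token := PySem.Chars.strip segment
      if token.isEmpty then parts else parts ++ [String.ofList token]) parts) []

-- ===== PORT B =====
-- literal port of B (Source B): one scan over the characters; a delimiter flushes the buffer.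
def pvAltStep (st : List String × List Char) (ch : Char) : List String × List Char :=
  if ch = '\r' ∨ ch = '\n' ∨ ch = '|' then
    let token := PySem.Chars.strip st.2
    (if token.isEmpty then st.1 else st.1 ++ [String.ofList token], [])
  else (st.1, st.2 ++ [ch])

def split_helper_topics_text_py_alt (raw : String) : List String :=
  let raw0 : String := if raw == "" then "" else raw
  let st := raw0.toList.foldl pvAltStep ([], [])
  let token := PySem.Chars.strip st.2
  if token.isEmpty then st.1 else st.1 ++ [String.ofList token]

-- ===== PRECONDITION & SPEC =====
def Spec_split_helper_topics_text_py (raw : String) (out : List String) : Prop := out = split_helper_topics_text_py_alt raw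
instance (raw : String) (out : List String) : Decidable (Spec_split_helper_topics_text_py raw out) := by unfold Spec_split_helper_topics_text_py; infer_instance

-- ===== CLAIM (what is proved, stated in full; the proofs are below) =====
def Claim_equal_split_helper_topics_text_py : Prop := ∀ (raw : String), Dom_split_helper_topics_text_py raw → Spec_split_helper_topics_text_py raw (split_helper_topics_text_py raw)

-- ===== LEMMAS AND PROOFS =====

-- `raw or ""` is the identity on strings
theorem pvOr0 (raw : String) : (if raw == "" then "" else raw) = raw := by
  by_cases h : raw = "" <;> simp [h]

-- splitting a char list at every char satisfying p (spec of str.split on one delimiter char)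
def pvSplitCh (p : Char → Bool) : List Char → List (List Char)
  | [] => [[]]
  | c :: cs =>
    if p c then [] :: pvSplitCh p cs
    else match pvSplitCh p cs with
      | [] => [[c]]
      | g :: gs => (c :: g) :: gs

-- prefix the first group
def pvModFirst (pre : List Char) : List (List Char) → List (List Char)
  | [] => [pre]
  | g :: gs => (pre ++ g) :: gs

theorem pvSplitCh_ne_nil (p : Char → Bool) (l : List Char) : pvSplitCh p l ≠ [] := by
  cases l with
  | nil => simp [pvSplitCh]
  | cons c cs => unfold pvSplitCh; split; · simp
                 · split <;> simp

theorem pvModFirst_nil (xs : List (List Char)) (h : xs ≠ []) : pvModFirst [] xs = xs := by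
  cases xs with
  | nil => exact absurd rfl h
  | cons g gs => simp [pvModFirst]

theorem pvSplitOn_go (d : Char) (l : List Char) :
    ∀ (fuel : Nat) (cur : List Char) (acc : List (List Char)), l.length ≤ fuel →
      PySem.Chars.splitOn.go [d] fuel l cur acc
        = acc.reverse ++ pvModFirst cur.reverse (pvSplitCh (· == d) l) := by
  induction l with
  | nil =>
    intro fuel cur acc _
    cases fuel <;> simp [PySem.Chars.splitOn.go, pvSplitCh, pvModFirst]
  | cons c rest ih =>
    intro fuel cur acc h
    cases fuel with
    | zero => simp at h
    | succ f =>
      rw [PySem.Chars.splitOn.go.eq_def]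
      simp only [List.isPrefixOf, Bool.and_true]
      by_cases hd : d = c
      · subst hd
        simp only [beq_self_eq_true, if_pos, List.length_cons, List.length_nil, Nat.zero_add,
          List.drop_succ_cons, List.drop_zero]
        rw [ih f [] (cur.reverse :: acc) (by simpa using Nat.le_of_succ_le_succ h)]
        simp only [List.reverse_nil]
        rw [pvModFirst_nil _ (pvSplitCh_ne_nil _ _)]
        simp [pvSplitCh, pvModFirst]
      · have hbe : (d == c) = false := by simp [hd]
        simp only [hbe, Bool.false_eq_true, if_neg, not_false_iff]
        rw [ih f (c :: cur) acc (by simpa using Nat.le_of_succ_le_succ h)]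
        have hc : (c == d) = false := by simp [Ne.symm hd]
        simp only [pvSplitCh, hc, Bool.false_eq_true, if_neg, not_false_iff]
        cases hs : pvSplitCh (· == d) rest with
        | nil => exact absurd hs (pvSplitCh_ne_nil _ _)
        | cons g gs => simp [pvModFirst]

theorem pvSplitOn_single (d : Char) (l : List Char) :
    PySem.Chars.splitOn l [d] = pvSplitCh (· == d) l := by
  rw [PySem.Chars.splitOn, pvSplitOn_go d l (l.length+1) [] [] (by omega)]
  simp [pvModFirst_nil _ (pvSplitCh_ne_nil _ _)]

-- the token(s) a segment contributes
def pvEmit (g : List Char) : List String :=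
  let token := PySem.Chars.strip g
  if token.isEmpty then [] else [String.ofList token]

theorem pvEmit_nil : pvEmit [] = [] := by decide

-- A's inner fold appends the emitted tokens
theorem pvInnerFold (segs : List (List Char)) (parts : List String) :
    segs.foldl (fun parts segment =>
      let token := PySem.Chars.strip segment
      if token.isEmpty then parts else parts ++ [String.ofList token]) parts
      = parts ++ segs.flatMap pvEmit := by
  induction segs generalizing parts with
  | nil => simp
  | cons s ss ih =>
    simp only [List.foldl_cons, List.flatMap_cons, ih, pvEmit]
    split <;> simp

-- a fold that appends f x for each x is init ++ flatMap f
theorem pvFoldlAppend {α β : Type} (f : α → List β) (l : List α) :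
    ∀ init, l.foldl (fun acc x => acc ++ f x) init = init ++ l.flatMap f := by
  induction l with
  | nil => intro init; simp
  | cons x xs ih => intro init; simp [ih]

-- splitting twice is splitting on the union of the delimiters
theorem pvSplitCh_compose (p q : Char → Bool) (l : List Char) :
    (pvSplitCh p l).flatMap (pvSplitCh q) = pvSplitCh (fun c => p c || q c) l := by
  induction l with
  | nil => simp [pvSplitCh]
  | cons c cs ih =>
    by_cases hp : p c
    · simp only [pvSplitCh, hp, if_pos, Bool.true_or, List.flatMap_cons, ih]
      simp [pvSplitCh]
    · cases hs : pvSplitCh p cs with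
      | nil => exact absurd hs (pvSplitCh_ne_nil _ _)
      | cons g gs =>
        have hIH : pvSplitCh q g ++ gs.flatMap (pvSplitCh q) = pvSplitCh (fun c => p c || q c) cs := by
          simpa [hs] using ih
        by_cases hq : q c
        · simp only [pvSplitCh, hp, Bool.false_eq_true, if_neg, not_false_iff, hq, Bool.false_or,
            if_pos, hs, List.flatMap_cons]
          rw [← hIH]
          simp [pvSplitCh, hq]
        · cases hg : pvSplitCh q g with
          | nil => exact absurd hg (pvSplitCh_ne_nil _ _)
          | cons h hs' =>
            simp only [pvSplitCh, hp, hq, Bool.false_eq_true, if_neg, not_false_iff, Bool.false_or,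
              hs, List.flatMap_cons]
            rw [← hIH, hg]
            simp [pvSplitCh, hq, hg]

-- the single-pass tokenizer (B's algorithm as a recursion)
def pvTok (p : Char → Bool) (buf : List Char) : List Char → List String
  | [] => pvEmit buf
  | c :: cs => if p c then pvEmit buf ++ pvTok p [] cs else pvTok p (buf ++ [c]) cs

theorem pvTok_eq_splitCh (p : Char → Bool) (l : List Char) :
    ∀ buf, pvTok p buf l = (pvModFirst buf (pvSplitCh p l)).flatMap pvEmit := by
  induction l with
  | nil => intro buf; simp [pvTok, pvSplitCh, pvModFirst]
  | cons c cs ih =>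
    intro buf
    by_cases hp : p c
    · simp only [pvTok, hp, if_pos, pvSplitCh, ih []]
      cases hs : pvSplitCh p cs with
      | nil => exact absurd hs (pvSplitCh_ne_nil _ _)
      | cons g gs => simp [pvModFirst]
    · simp only [pvTok, hp, Bool.false_eq_true, if_neg, not_false_iff, pvSplitCh, ih (buf ++ [c])]
      cases hs : pvSplitCh p cs with
      | nil => exact absurd hs (pvSplitCh_ne_nil _ _)
      | cons g gs => simp [pvModFirst]

-- CRLF/CR normalization as a recursion
def pvRepl1 : List Char → List Char
  | [] => []
  | '\r' :: '\n' :: cs => '\n' :: pvRepl1 cs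
  | c :: cs => c :: pvRepl1 cs

def pvSub (c : Char) : Char := if c = '\r' then '\n' else c

theorem pvReplace_go_cr (l : List Char) :
    ∀ (fuel : Nat) (acc : List Char), l.length ≤ fuel →
      PySem.Chars.replace.go ['\r'] ['\n'] fuel l acc = acc.reverse ++ l.map pvSub := by
  induction l with
  | nil => intro fuel acc _; cases fuel <;> simp [PySem.Chars.replace.go]
  | cons c rest ih =>
    intro fuel acc h
    cases fuel with
    | zero => simp at h
    | succ f =>
      rw [PySem.Chars.replace.go.eq_def]
      simp only [List.isPrefixOf, Bool.and_true]
      by_cases hc : c = '\r'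
      · subst hc
        simp only [beq_self_eq_true, if_pos, List.length_cons, List.length_nil, Nat.zero_add,
          List.drop_succ_cons, List.drop_zero]
        rw [ih f _ (by simpa using Nat.le_of_succ_le_succ h)]
        simp [pvSub]
      · have : ('\r' == c) = false := by simp [Ne.symm hc]
        simp only [this, Bool.false_eq_true, if_neg, not_false_iff]
        rw [ih f _ (by simpa using Nat.le_of_succ_le_succ h)]
        simp [pvSub, hc]

theorem pvReplace_cr (l : List Char) :
    PySem.Chars.replace l ['\r'] ['\n'] = l.map pvSub := by
  rw [PySem.Chars.replace]
  simp only [List.isEmpty_cons, Bool.false_eq_true, if_neg, not_false_iff]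
  exact pvReplace_go_cr l l.length [] le_rfl

theorem pvReplace_go_crlf (l : List Char) :
    ∀ (fuel : Nat) (acc : List Char), l.length ≤ fuel →
      PySem.Chars.replace.go ['\r', '\n'] ['\n'] fuel l acc = acc.reverse ++ pvRepl1 l := by
  induction l using pvRepl1.induct with
  | case1 => intro fuel acc _; cases fuel <;> simp [PySem.Chars.replace.go, pvRepl1]
  | case2 cs ih =>
    intro fuel acc h
    cases fuel with
    | zero => simp at h
    | succ f =>
      rw [PySem.Chars.replace.go.eq_def]
      simp only [List.isPrefixOf, beq_self_eq_true, Bool.and_true, if_pos,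
        List.length_cons, List.drop_succ_cons, List.drop_zero, List.length_nil, Nat.zero_add]
      rw [ih f _ (by simp at h; omega)]
      simp [pvRepl1]
  | case3 c cs hne ih =>
    intro fuel acc h
    cases fuel with
    | zero => simp at h
    | succ f =>
      rw [PySem.Chars.replace.go.eq_def]
      have hpre : List.isPrefixOf ['\r', '\n'] (c :: cs) = false := by
        by_cases hc : c = '\r'
        · subst hc
          cases cs with
          | nil => simp [List.isPrefixOf]
          | cons d ds =>
            have hd : d ≠ '\n' := fun hh => hne ds rfl (by rw [hh])
            simp [List.isPrefixOf, Ne.symm hd]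
        · simp only [List.isPrefixOf, Bool.and_eq_false_iff]
          left
          exact beq_eq_false_iff_ne.mpr (fun hh => hc hh.symm)
      simp only [hpre, Bool.false_eq_true, if_neg, not_false_iff]
      rw [ih f _ (by simpa using Nat.le_of_succ_le_succ h)]
      have hrw : pvRepl1 (c :: cs) = c :: pvRepl1 cs := by
        rw [pvRepl1.eq_def]
        split
        · next heq => exact absurd heq (by simp)
        · next cs' heq =>
          exfalso
          obtain ⟨h1, h2⟩ : c = '\r' ∧ cs = '\n' :: cs' := by
            injection heq with ha hb
            exact ⟨ha, hb⟩
          exact hne cs' h1 h2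
        · next heq =>
          injection heq with ha hb
          rw [ha, hb]
      simp [hrw]

theorem pvReplace_crlf (l : List Char) :
    PySem.Chars.replace l ['\r', '\n'] ['\n'] = pvRepl1 l := by
  rw [PySem.Chars.replace]
  simp only [List.isEmpty_cons, Bool.false_eq_true, if_neg, not_false_iff]
  exact pvReplace_go_crlf l l.length [] le_rfl

def pvQ2 (c : Char) : Bool := c == '\n' || c == '|'
def pvQ3 (c : Char) : Bool := c == '\r' || c == '\n' || c == '|'

-- normalization does not change the tokens once \r is itself a delimiter
theorem pvTok_norm (l : List Char) :
    ∀ buf, pvTok pvQ2 buf ((pvRepl1 l).map pvSub) = pvTok pvQ3 buf l := by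
  induction l using pvRepl1.induct with
  | case1 => intro buf; rfl
  | case2 cs ih =>
    intro buf
    have h1 : pvRepl1 ('\r' :: '\n' :: cs) = '\n' :: pvRepl1 cs := by rfl
    rw [h1]
    simp only [List.map_cons]
    have hs : pvSub '\n' = '\n' := by decide
    rw [hs]
    show pvTok pvQ2 buf ('\n' :: (pvRepl1 cs).map pvSub) = pvTok pvQ3 buf ('\r' :: '\n' :: cs)
    rw [pvTok, pvTok, pvTok]
    simp only [show pvQ2 '\n' = true by decide, show pvQ3 '\r' = true by decide,
      show pvQ3 '\n' = true by decide, if_pos]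
    rw [ih [], pvEmit_nil]
    simp
  | case3 c cs hne ih =>
    intro buf
    have h1 : pvRepl1 (c :: cs) = c :: pvRepl1 cs := by
      rw [pvRepl1.eq_def]
      split
      · next heq => exact absurd heq (by simp)
      · next cs' heq =>
        exfalso
        obtain ⟨ha, hb⟩ : c = '\r' ∧ cs = '\n' :: cs' := by
          injection heq with ha hb; exact ⟨ha, hb⟩
        exact hne cs' ha hb
      · next heq =>
        injection heq with ha hb
        rw [ha, hb]
    rw [h1]
    simp only [List.map_cons]
    by_cases hc : c = '\r'
    · -- lone \r (not followed by \n): maps to \n; both sides flush the buffer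
      subst hc
      have hs : pvSub '\r' = '\n' := by decide
      rw [hs]
      rw [show pvTok pvQ2 buf ('\n' :: (pvRepl1 cs).map pvSub)
            = pvEmit buf ++ pvTok pvQ2 [] ((pvRepl1 cs).map pvSub) by
          rw [pvTok]; simp [show pvQ2 '\n' = true by decide]]
      rw [show pvTok pvQ3 buf ('\r' :: cs) = pvEmit buf ++ pvTok pvQ3 [] cs by
          rw [pvTok]; simp [show pvQ3 '\r' = true by decide]]
      rw [ih []]
    · have hs : pvSub c = c := by simp [pvSub, hc]
      rw [hs]
      by_cases hq : pvQ2 c = true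
      · have hq' : c = '\n' ∨ c = '|' := by simpa [pvQ2] using hq
        have hq3 : pvQ3 c = true := by rcases hq' with h | h <;> simp [pvQ3, h]
        rw [pvTok, pvTok]
        simp only [hq, hq3, if_pos]
        rw [ih []]
      · have hq' : ¬c = '\n' ∧ ¬c = '|' := by simpa [pvQ2, not_or] using hq
        have hq3 : pvQ3 c = false := by simp [pvQ3, hc, hq'.1, hq'.2]
        rw [pvTok, pvTok]
        simp only [hq, hq3, Bool.false_eq_true, if_neg, not_false_iff]
        rw [ih (buf ++ [c])]

-- B's fold computes pvTok
theorem pvAltFold (cs : List Char) :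
    ∀ (parts : List String) (buf : List Char),
      (let st := cs.foldl pvAltStep (parts, buf)
       let token := PySem.Chars.strip st.2
       if token.isEmpty then st.1 else st.1 ++ [String.ofList token])
        = parts ++ pvTok pvQ3 buf cs := by
  induction cs with
  | nil =>
    intro parts buf
    simp only [List.foldl_nil, pvTok, pvEmit]
    split <;> simp
  | cons c cs ih =>
    intro parts buf
    by_cases hc : c = '\r' ∨ c = '\n' ∨ c = '|'
    · have hq3 : pvQ3 c = true := by
        rcases hc with h | h | h <;> simp [pvQ3, h]
      simp only [List.foldl_cons, pvAltStep, hc, if_pos, pvTok, hq3]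
      rw [ih]
      simp only [pvEmit]
      split <;> simp
    · have hq3 : pvQ3 c = false := by
        simp only [not_or] at hc
        simp [pvQ3, hc.1, hc.2.1, hc.2.2]
      simp only [List.foldl_cons, pvAltStep, hc, if_neg, not_false_iff, pvTok, hq3,
        Bool.false_eq_true]
      rw [ih]

-- ===== VERDICT (by name: the statement is the Claim_ definition above) =====
theorem split_helper_topics_text_py_spec : Claim_equal_split_helper_topics_text_py := by
  intro raw _
  unfold Spec_split_helper_topics_text_py
  unfold split_helper_topics_text_py split_helper_topics_text_py_alt
  simp only [pvOr0]
  rw [show (PySem.Str.replace (PySem.Str.replace raw "\r\n" "\n") "\r" "\n").toList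
        = ((pvRepl1 raw.toList).map pvSub) by
      simp only [PySem.Str.replace, String.toList_ofList]
      rw [show ("\r\n" : String).toList = ['\r', '\n'] from rfl,
          show ("\n" : String).toList = ['\n'] from rfl,
          show ("\r" : String).toList = ['\r'] from rfl]
      rw [pvReplace_crlf, pvReplace_cr]]
  rw [pvSplitOn_single]
  rw [show ((pvSplitCh (· == '\n') ((pvRepl1 raw.toList).map pvSub)).foldl (fun parts line =>
        (PySem.Chars.splitOn line ['|']).foldl (fun parts segment =>
          let token := PySem.Chars.strip segment
          if token.isEmpty then parts else parts ++ [String.ofList token]) parts) [])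
      = (pvSplitCh (· == '\n') ((pvRepl1 raw.toList).map pvSub)).flatMap
          (fun line => (pvSplitCh (· == '|') line).flatMap pvEmit) by
    refine (PySem.List.foldl_congr_mem _ _
        (fun parts line => parts ++ (pvSplitCh (· == '|') line).flatMap pvEmit) []
        (fun acc x _ => by rw [pvSplitOn_single, pvInnerFold])).trans ?_
    exact pvFoldlAppend _ _ []]
  rw [← List.flatMap_assoc, pvSplitCh_compose]
  rw [show (fun c => (c == '\n') || (c == '|')) = pvQ2 from rfl]
  rw [show (pvSplitCh pvQ2 ((pvRepl1 raw.toList).map pvSub)).flatMap pvEmit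
        = pvTok pvQ2 [] ((pvRepl1 raw.toList).map pvSub) by
      rw [pvTok_eq_splitCh, pvModFirst_nil _ (pvSplitCh_ne_nil _ _)]]
  rw [pvTok_norm]
  rw [pvAltFold raw.toList [] []]
  simp
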